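-- pv_equiv track=rewrite | github.com/FranklinNotOld/ECE57000ProjectCode | sumo/geometry.py | _group_contiguous
-- ===== SOURCE A (Python) =====
-- from typing import Dict, List, Tuple
--
-- def _group_contiguous(indices: List[int]) -> List[List[int]]:
--     """Group sorted indices into contiguous blocks.
--
--     Example: [0, 1, 3] → [[0, 1], [3]]
--     """
--     if not indices:
--         return []
--     blocks: List[List[int]] = [[indices[0]]]
--     for i in range(1, len(indices)):
--         if indices[i] == indices[i - 1] + 1:
--             blocks[-1].append(indices[i])
--         else:
--             blocks.append([indices[i]])
--     return blocks
-- ===== SOURCE B (Python) =====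
-- from typing import List
--
--
-- def _group_contiguous(indices: List[int]) -> List[List[int]]:
--     """Group sorted indices into contiguous blocks by run-splitting:
--     for each block, scan ahead to the end of the run, then emit the
--     whole block at once as a slice (blocks are never mutated after
--     creation)."""
--     blocks: List[List[int]] = []
--     i, n = 0, len(indices)
--     while i < n:
--         j = i + 1
--         while j < n and indices[j] == indices[j - 1] + 1:
--             j += 1
--         blocks.append(indices[i:j])
--         i = j
--     return blocks
-- ===== Notes on version B (the rewrite author's own statement) =====
-- stated objective: alternative
-- what changed: Replaced A's flat element-at-a-time pass that mutates the last block (blocks[-1].append) with a run-splitting nested loop: an inner scan finds each run's end and the whole block is emitted at once as a slice indices[i:j], so blocks are never modified after creation.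
import Mathlib
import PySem

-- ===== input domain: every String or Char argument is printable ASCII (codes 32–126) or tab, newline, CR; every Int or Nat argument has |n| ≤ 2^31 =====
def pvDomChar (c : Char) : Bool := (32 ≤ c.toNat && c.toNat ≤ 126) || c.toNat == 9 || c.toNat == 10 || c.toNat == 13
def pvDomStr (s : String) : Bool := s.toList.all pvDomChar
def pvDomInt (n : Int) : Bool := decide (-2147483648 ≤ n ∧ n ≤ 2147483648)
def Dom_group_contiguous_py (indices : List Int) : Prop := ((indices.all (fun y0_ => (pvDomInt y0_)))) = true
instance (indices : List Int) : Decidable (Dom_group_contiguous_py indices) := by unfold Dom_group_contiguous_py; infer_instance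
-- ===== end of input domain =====

-- B replaces A's flat pass mutating blocks[-1] with a run-splitting nested loop that emits each block whole as a slice (alternative decomposition).


-- ===== PORT A =====
-- For-loop over range(1, len): ported as a fold over the tail carrying (blocks, indices[i-1]);
-- blocks[-1].append(x) is blocks.dropLast ++ [last ++ [x]].
def group_contiguous_py (indices : List Int) : List (List Int) :=
  match indices with
  | [] => []
  | x :: rest =>
    (rest.foldl
      (fun (st : List (List Int) × Int) v =>
        if v = st.2 + 1 then (st.1.dropLast ++ [st.1.getLastD [] ++ [v]], v)
        else (st.1 ++ [[v]], v))
      ([[x]], x)).1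

-- ===== PORT B =====
-- inner while loop 'while j < n and indices[j] == indices[j-1] + 1: j += 1':
-- number of elements after position i that continue the run (j - i - 1),
-- computed by scanning the suffix after indices[i]
def pvRunLen (prev : Int) : List Int → Nat
  | [] => 0
  | v :: r => if v = prev + 1 then 1 + pvRunLen v r else 0

-- outer while loop 'while i < n', recursing on the remaining suffix indices[i:];
-- the emitted slice indices[i:j] is the suffix's head followed by its next j-i-1 elements (take; exact here since 0 ≤ i < j ≤ n)
def pvAltLoop : List Int → List (List Int)
  | [] => []
  | x :: rest =>
    (x :: rest.take (pvRunLen x rest)) :: pvAltLoop (rest.drop (pvRunLen x rest))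
termination_by xs => xs.length
decreasing_by simp [List.length_drop]

def group_contiguous_py_alt (indices : List Int) : List (List Int) :=
  pvAltLoop indices

-- ===== PRECONDITION & SPEC =====
def Spec_group_contiguous_py (indices : List Int) (out : List (List Int)) : Prop := out = group_contiguous_py_alt indices
instance (indices : List Int) (out : List (List Int)) : Decidable (Spec_group_contiguous_py indices out) := by unfold Spec_group_contiguous_py; infer_instance

-- ===== CLAIM (what is proved, stated in full; the proofs are below) =====
def Claim_equal_group_contiguous_py : Prop := ∀ (indices : List Int), Dom_group_contiguous_py indices → Spec_group_contiguous_py indices (group_contiguous_py indices)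

-- ===== LEMMAS AND PROOFS =====

-- closed form of A's loop: successive runs
def pvRun (b : List Int) (prev : Int) : List Int → List (List Int)
  | [] => [b]
  | v :: r => if v = prev + 1 then pvRun (b ++ [v]) v r else b :: pvRun [v] v r

def pvTakeRun (prev : Int) : List Int → List Int
  | [] => []
  | v :: r => if v = prev + 1 then v :: pvTakeRun v r else []

def pvDropRun (prev : Int) : List Int → List Int
  | [] => []
  | v :: r => if v = prev + 1 then pvDropRun v r else v :: r

theorem dropLast_getLastD {α : Type} (d : α) (l : List α) (h : l ≠ []) :
    l.dropLast ++ [l.getLastD d] = l := by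
  rw [List.getLastD_eq_getLast?, List.getLast?_eq_some_getLast h, Option.getD_some]
  exact List.dropLast_append_getLast h

theorem foldA_run (xs : List Int) :
    ∀ (blocks : List (List Int)) (prev : Int), blocks ≠ [] →
    (xs.foldl
      (fun (st : List (List Int) × Int) v =>
        if v = st.2 + 1 then (st.1.dropLast ++ [st.1.getLastD [] ++ [v]], v)
        else (st.1 ++ [[v]], v))
      (blocks, prev)).1 = blocks.dropLast ++ pvRun (blocks.getLastD []) prev xs := by
  induction xs with
  | nil =>
    intro blocks prev h
    simp only [List.foldl_nil, pvRun]
    exact (dropLast_getLastD [] blocks h).symm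
  | cons v r ih =>
    intro blocks prev h
    simp only [List.foldl_cons, pvRun]
    by_cases hv : v = prev + 1
    · simp only [if_pos hv]
      rw [ih _ v (by simp)]
      simp
    · simp only [if_neg hv]
      rw [ih _ v (by simp)]
      calc (blocks ++ [[v]]).dropLast ++ pvRun ((blocks ++ [[v]]).getLastD []) v r
          = blocks ++ pvRun [v] v r := by simp
        _ = blocks.dropLast ++ ([blocks.getLastD []] ++ pvRun [v] v r) := by
            rw [← List.append_assoc, dropLast_getLastD [] blocks h]
        _ = blocks.dropLast ++ (blocks.getLastD [] :: pvRun [v] v r) := rfl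

theorem pvRun_eq (xs : List Int) :
    ∀ (b : List Int) (prev : Int),
    pvRun b prev xs = (b ++ pvTakeRun prev xs) ::
      (match pvDropRun prev xs with
       | [] => []
       | w :: r => pvRun [w] w r) := by
  induction xs with
  | nil => intro b prev; simp [pvRun, pvTakeRun, pvDropRun]
  | cons v r ih =>
    intro b prev
    simp only [pvRun, pvTakeRun, pvDropRun]
    by_cases hv : v = prev + 1
    · simp only [if_pos hv]
      rw [ih (b ++ [v]) v]
      simp
    · simp [if_neg hv]

theorem take_runLen (xs : List Int) : ∀ (prev : Int),
    xs.take (pvRunLen prev xs) = pvTakeRun prev xs := by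
  induction xs with
  | nil => intro prev; simp [pvRunLen, pvTakeRun]
  | cons v r ih =>
    intro prev
    simp only [pvRunLen, pvTakeRun]
    by_cases hv : v = prev + 1
    · simp [if_pos hv, Nat.add_comm 1 (pvRunLen v r), ih v]
    · simp [if_neg hv]

theorem drop_runLen (xs : List Int) : ∀ (prev : Int),
    xs.drop (pvRunLen prev xs) = pvDropRun prev xs := by
  induction xs with
  | nil => intro prev; simp [pvRunLen, pvDropRun]
  | cons v r ih =>
    intro prev
    simp only [pvRunLen, pvDropRun]
    by_cases hv : v = prev + 1
    · simp [if_pos hv, Nat.add_comm 1 (pvRunLen v r), ih v]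
    · simp [if_neg hv]

theorem pvDropRun_length (prev : Int) (xs : List Int) :
    (pvDropRun prev xs).length ≤ xs.length := by
  induction xs generalizing prev with
  | nil => simp [pvDropRun]
  | cons v r ih =>
    simp only [pvDropRun]
    split
    · exact le_trans (ih _) (Nat.le_succ _)
    · simp

theorem altLoop_run (n : Nat) : ∀ (xs : List Int), xs.length ≤ n → ∀ (v : Int),
    pvAltLoop (v :: xs) = pvRun [v] v xs := by
  induction n with
  | zero =>
    intro xs hlen v
    have : xs = [] := List.eq_nil_of_length_eq_zero (Nat.le_zero.mp hlen)
    subst this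
    rw [pvAltLoop]
    simp [pvAltLoop, pvRunLen, pvRun]
  | succ m ih =>
    intro xs hlen v
    rw [pvAltLoop, take_runLen, drop_runLen, pvRun_eq]
    cases hd : pvDropRun v xs with
    | nil => simp [pvAltLoop]
    | cons w r =>
      have hwr : r.length ≤ m := by
        have h2 := pvDropRun_length v xs
        rw [hd] at h2
        simp at h2
        omega
      simp only [List.cons_append, List.nil_append]
      rw [ih r hwr w]

-- ===== VERDICT (by name: the statement is the Claim_ definition above) =====
theorem group_contiguous_py_spec : Claim_equal_group_contiguous_py := by
  intro indices _
  unfold Spec_group_contiguous_py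
  cases indices with
  | nil => simp [group_contiguous_py, group_contiguous_py_alt, pvAltLoop]
  | cons x rest =>
    simp only [group_contiguous_py, group_contiguous_py_alt]
    rw [foldA_run rest [[x]] x (by simp),
      altLoop_run rest.length rest (le_refl _) x]
    simp
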